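-- pv_equiv track=rewrite | github.com/OrderAndCh4oS/filter-out-lowest-value-duplicates | scripts.py | sarcoma
-- ===== SOURCE A (Python) =====
-- def sarcoma(arr):
--     t_v = {}
--     result = []
--     for row in arr:
--         if not t_v.get(row['T']):
--             t_v[row['T']] = (row['V'], len(result))
--             result.append(row)
--             continue
--
--         if row['V'] > t_v[row['T']][0]:
--             t_v[row['T']] = (row['V'], t_v[row['T']][1])
--             result[t_v[row['T']][1]] = row
--
--     return result
-- ===== SOURCE B (Python) =====
-- def sarcoma(arr):
--     keys = list(dict.fromkeys(row['T'] for row in arr))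
--     return [max((row for row in arr if row['T'] == t), key=lambda row: row['V'])
--             for t in keys]
-- ===== Notes on version B (the rewrite author's own statement) =====
-- stated objective: alternative
-- what changed: Replaces A's single online pass (dict key to (value, slot index) with in-place result[slot] overwrites) by an offline two-phase algorithm: first collect the distinct T keys in first-appearance order via dict.fromkeys, then for each key independently take max(rows with that key, key=V) over the whole input, which keeps the first maximal row exactly as A does.
import Mathlib
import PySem

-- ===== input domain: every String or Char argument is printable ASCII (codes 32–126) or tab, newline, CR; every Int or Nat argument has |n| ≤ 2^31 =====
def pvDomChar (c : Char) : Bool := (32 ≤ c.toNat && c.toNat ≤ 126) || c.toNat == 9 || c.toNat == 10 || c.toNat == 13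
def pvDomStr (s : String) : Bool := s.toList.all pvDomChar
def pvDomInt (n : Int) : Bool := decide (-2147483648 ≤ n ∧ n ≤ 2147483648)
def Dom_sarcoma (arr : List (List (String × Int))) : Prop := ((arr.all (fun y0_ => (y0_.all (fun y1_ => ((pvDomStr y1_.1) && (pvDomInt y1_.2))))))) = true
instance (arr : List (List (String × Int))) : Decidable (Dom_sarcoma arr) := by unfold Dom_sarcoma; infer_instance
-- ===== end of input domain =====

-- B replaces A's single online pass (dict key ↦ (value, slot) with in-place result overwrites)
-- by an offline two-phase algorithm: distinct keys in first-appearance order, then per-key max scan.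


-- row['T'] / row['V'] (a row is a Python dict of String keys to Int values);
-- under Pre_ the key is present, so the getD default is never used.
def rowT (row : List (String × Int)) : Int := ((PySem.Dict.mk row).get? "T").getD 0
def rowV (row : List (String × Int)) : Int := ((PySem.Dict.mk row).get? "V").getD 0

-- ===== PORT A =====
-- loop body of A: state = (t_v : key ↦ (best V, slot index), result)
def sarcomaStep (st : PySem.Dict Int (Int × Nat) × List (List (String × Int)))
    (row : List (String × Int)) : PySem.Dict Int (Int × Nat) × List (List (String × Int)) :=
  match st.1.get? (rowT row) with
  | none => (st.1.insert (rowT row) (rowV row, st.2.length), st.2 ++ [row])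
  | some p =>
      if p.1 < rowV row then (st.1.insert (rowT row) (rowV row, p.2), st.2.set p.2 row)
      else st

def sarcoma (arr : List (List (String × Int))) : List (List (String × Int)) :=
  (arr.foldl sarcomaStep (PySem.Dict.empty, [])).2

-- ===== PORT B =====
-- max(rows with key t, key=V): Python's max returns the FIRST maximal element = PySem.List.max?
def bestRow (arr : List (List (String × Int))) (t : Int) : List (String × Int) :=
  (PySem.List.max? (arr.filter (fun row => rowT row == t)) rowV).getD []

-- phase 1: list(dict.fromkeys(...)) = PySem.List.dedup; phase 2: per-key max scan
def sarcoma_alt (arr : List (List (String × Int))) : List (List (String × Int)) :=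
  (PySem.List.dedup (arr.map rowT)).map (bestRow arr)

-- ===== PRECONDITION & SPEC =====
-- Pre_ excludes exactly the rows on which Python A raises KeyError: a row missing key "T" or key "V".
def Pre_sarcoma (arr : List (List (String × Int))) : Prop :=
  ∀ row ∈ arr, (PySem.Dict.mk row).contains "T" = true ∧ (PySem.Dict.mk row).contains "V" = true
instance (arr : List (List (String × Int))) : Decidable (Pre_sarcoma arr) := by unfold Pre_sarcoma; infer_instance
def pvWitness_sarcoma : (List (List (String × Int))) := [[("T", 1), ("V", 2)], [("T", 1), ("V", 3)]]

def Spec_sarcoma (arr : List (List (String × Int))) (out : List (List (String × Int))) : Prop := out = sarcoma_alt arr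
instance (arr : List (List (String × Int))) (out : List (List (String × Int))) : Decidable (Spec_sarcoma arr out) := by unfold Spec_sarcoma; infer_instance

-- ===== CLAIM (what is proved, stated in full; the proofs are below) =====
def Claim_equal_sarcoma : Prop := ∀ (arr : List (List (String × Int))), Dom_sarcoma arr → Pre_sarcoma arr → Spec_sarcoma arr (sarcoma arr)

-- ===== LEMMAS AND PROOFS =====

-- keys of a prefix, in first-appearance order
def keysOf (p : List (List (String × Int))) : List Int := PySem.List.dedup (p.map rowT)

lemma mem_keysOf (p : List (List (String × Int))) (t : Int) :
    t ∈ keysOf p ↔ t ∈ p.map rowT := by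
  simp [keysOf, PySem.List.dedup, PySem.Set.mem_ofList]

lemma keysOf_append (p : List (List (String × Int))) (r : List (String × Int)) :
    keysOf (p ++ [r]) = if rowT r ∈ keysOf p then keysOf p else keysOf p ++ [rowT r] := by
  simp only [keysOf, List.map_append, List.map_cons, List.map_nil, PySem.List.dedup,
    PySem.Set.ofList, List.foldl_append, List.foldl_cons, List.foldl_nil, PySem.Set.add,
    PySem.Set.contains]
  simp

lemma max?_append_singleton {α κ : Type} [LT κ] [DecidableLT κ]
    (l : List α) (key : α → κ) (x : α) :
    PySem.List.max? (l ++ [x]) key =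
      match PySem.List.max? l key with
      | none => some x
      | some m => if key m < key x then some x else some m := by
  simp only [PySem.List.max?, List.foldl_append, List.foldl_cons, List.foldl_nil]
  rfl

lemma bestRow_append_of_ne (p : List (List (String × Int))) (r : List (String × Int))
    (t : Int) (h : t ≠ rowT r) : bestRow (p ++ [r]) t = bestRow p t := by
  have : (fun row => rowT row == t) r = false := by simp [Ne.symm h]
  simp [bestRow, List.filter_append, this]

lemma max?_keysOf (p : List (List (String × Int))) (t : Int) (h : t ∈ keysOf p) :
    PySem.List.max? (p.filter (fun row => rowT row == t)) rowV = some (bestRow p t) := by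
  rw [mem_keysOf] at h
  obtain ⟨row, hrow, hT⟩ := List.mem_map.mp h
  cases hmax : PySem.List.max? (p.filter (fun row => rowT row == t)) rowV with
  | none =>
      have := (PySem.List.max?_eq_none_iff _ _).mp hmax
      have : row ∈ (p.filter (fun row => rowT row == t)) := by
        simp [List.mem_filter, hrow, hT]
      simp_all
  | some m => simp [bestRow, hmax]

lemma bestRow_append_self (p : List (List (String × Int))) (r : List (String × Int))
    (h : rowT r ∈ keysOf p) :
    bestRow (p ++ [r]) (rowT r) =
      if rowV (bestRow p (rowT r)) < rowV r then r else bestRow p (rowT r) := by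
  have hf : (fun row => rowT row == rowT r) r = true := by simp
  unfold bestRow
  rw [List.filter_append, List.filter_cons, if_pos hf, List.filter_nil,
    max?_append_singleton, max?_keysOf p _ h]
  by_cases hv : rowV (bestRow p (rowT r)) < rowV r <;> simp [hv]

lemma bestRow_append_self_new (p : List (List (String × Int))) (r : List (String × Int))
    (h : rowT r ∉ keysOf p) : bestRow (p ++ [r]) (rowT r) = r := by
  have hnil : p.filter (fun row => rowT row == rowT r) = [] := by
    apply List.filter_eq_nil_iff.mpr
    intro a ha hb
    exact h ((mem_keysOf p (rowT r)).mpr (List.mem_map.mpr ⟨a, ha, by simpa using hb⟩))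
  have hf : (fun row => rowT row == rowT r) r = true := by simp
  unfold bestRow
  rw [List.filter_append, List.filter_cons, if_pos hf, List.filter_nil, hnil]
  simp [PySem.List.max?]

-- the invariant: A's state after a prefix p is B's two phases applied to p
def SInv (p : List (List (String × Int)))
    (st : PySem.Dict Int (Int × Nat) × List (List (String × Int))) : Prop :=
  st.2 = (keysOf p).map (bestRow p) ∧
  ∀ t : Int, st.1.get? t =
    if t ∈ keysOf p then some (rowV (bestRow p t), (keysOf p).idxOf t) else none

lemma inv_step (p : List (List (String × Int))) (r : List (String × Int))
    (st : PySem.Dict Int (Int × Nat) × List (List (String × Int)))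
    (h : SInv p st) : SInv (p ++ [r]) (sarcomaStep st r) := by
  obtain ⟨h1, h2⟩ := h
  have hnd : (keysOf p).Nodup := PySem.List.nodup_dedup _
  by_cases hm : rowT r ∈ keysOf p
  · -- key already seen
    have hk' : keysOf (p ++ [r]) = keysOf p := by rw [keysOf_append, if_pos hm]
    have htv := h2 (rowT r)
    rw [if_pos hm] at htv
    by_cases hv : rowV (bestRow p (rowT r)) < rowV r
    · -- strict improvement: A overwrites slot idxOf (rowT r)
      have hstep : sarcomaStep st r =
          (st.1.insert (rowT r) (rowV r, (keysOf p).idxOf (rowT r)),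
           st.2.set ((keysOf p).idxOf (rowT r)) r) := by
        simp [sarcomaStep, htv, hv]
      rw [hstep]
      constructor
      · -- result component
        rw [hk']
        have hlt : (keysOf p).idxOf (rowT r) < (keysOf p).length :=
          List.idxOf_lt_length_of_mem hm
        apply List.ext_getElem
        · simp [h1]
        · intro i hi1 hi2
          rw [List.getElem_set]
          by_cases hij : (keysOf p).idxOf (rowT r) = i
          · subst hij
            rw [if_pos rfl]
            have : (keysOf p)[(keysOf p).idxOf (rowT r)] = rowT r := List.getElem_idxOf hlt
            rw [List.getElem_map, this, bestRow_append_self p r hm, if_pos hv]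
          · have hne : (keysOf p)[i]'(by simpa using hi2) ≠ rowT r := by
              intro he
              apply hij
              have : (keysOf p)[i]'(by simpa using hi2) = (keysOf p)[(keysOf p).idxOf (rowT r)] := by
                rw [he]; exact (List.getElem_idxOf hlt).symm
              exact ((List.Nodup.getElem_inj_iff hnd).mp this).symm
            rw [if_neg hij]
            simp only [h1, List.getElem_map]
            rw [bestRow_append_of_ne p r _ hne]
      · -- dict component
        intro t
        rw [hk']
        by_cases ht : t = rowT r
        · subst ht
          rw [PySem.Dict.get?_insert_self, if_pos hm, bestRow_append_self p r hm, if_pos hv]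
        · rw [PySem.Dict.get?_insert_of_ne _ _ ht, h2 t]
          by_cases htm : t ∈ keysOf p
          · rw [if_pos htm, if_pos htm, bestRow_append_of_ne p r _ ht]
          · rw [if_neg htm, if_neg htm]
    · -- no improvement: state unchanged
      have hstep : sarcomaStep st r = st := by
        simp [sarcomaStep, htv, hv]
      rw [hstep]
      constructor
      · rw [hk', h1]
        apply List.map_congr_left
        intro t htm
        by_cases ht : t = rowT r
        · subst ht
          rw [bestRow_append_self p r hm, if_neg hv]
        · rw [bestRow_append_of_ne p r _ ht]
      · intro t
        rw [hk', h2 t]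
        by_cases htm : t ∈ keysOf p
        · rw [if_pos htm, if_pos htm]
          by_cases ht : t = rowT r
          · subst ht
            rw [bestRow_append_self p r hm, if_neg hv]
          · rw [bestRow_append_of_ne p r _ ht]
        · rw [if_neg htm, if_neg htm]
  · -- new key: A appends
    have hk' : keysOf (p ++ [r]) = keysOf p ++ [rowT r] := by rw [keysOf_append, if_neg hm]
    have htv := h2 (rowT r)
    rw [if_neg hm] at htv
    have hstep : sarcomaStep st r =
        (st.1.insert (rowT r) (rowV r, st.2.length), st.2 ++ [r]) := by
      simp [sarcomaStep, htv]
    rw [hstep]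
    have hlen : st.2.length = (keysOf p).length := by rw [h1, List.length_map]
    have hmapeq : (keysOf p).map (bestRow (p ++ [r])) = (keysOf p).map (bestRow p) := by
      apply List.map_congr_left
      intro t htm
      have ht : t ≠ rowT r := fun he => hm (he ▸ htm)
      exact bestRow_append_of_ne p r _ ht
    constructor
    · rw [hk', List.map_append, hmapeq, ← h1, List.map_cons, List.map_nil,
        bestRow_append_self_new p r hm]
    · intro t
      rw [hk']
      by_cases ht : t = rowT r
      · subst ht
        rw [PySem.Dict.get?_insert_self,
          if_pos (List.mem_append.mpr (Or.inr (List.mem_singleton.mpr rfl))),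
          bestRow_append_self_new p r hm]
        have : (keysOf p ++ [rowT r]).idxOf (rowT r) = (keysOf p).length := by
          simp [List.idxOf_append, hm]
        rw [this, hlen]
      · rw [PySem.Dict.get?_insert_of_ne _ _ ht, h2 t]
        have hmem : t ∈ keysOf p ++ [rowT r] ↔ t ∈ keysOf p := by
          simp [List.mem_append, ht]
        by_cases htm : t ∈ keysOf p
        · rw [if_pos htm, if_pos (hmem.mpr htm), bestRow_append_of_ne p r _ ht,
            List.idxOf_append_of_mem htm]
        · rw [if_neg htm, if_neg (fun hc => htm (hmem.mp hc))]

lemma inv_foldl (arr : List (List (String × Int))) :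
    SInv arr (arr.foldl sarcomaStep (PySem.Dict.empty, [])) := by
  induction arr using List.reverseRecOn with
  | nil =>
      refine ⟨rfl, fun t => ?_⟩
      simp [keysOf, PySem.List.dedup, PySem.Set.ofList, PySem.Dict.get?_empty]
  | append_singleton p r ih =>
      rw [List.foldl_append, List.foldl_cons, List.foldl_nil]
      exact inv_step p r _ ih

-- ===== VERDICT (by name: the statement is the Claim_ definition above) =====
theorem sarcoma_spec : Claim_equal_sarcoma := by
  intro arr _ _
  unfold Spec_sarcoma sarcoma sarcoma_alt
  exact (inv_foldl arr).1
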